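-- pv_equiv track=rewrite | github.com/Hyobi-Lim/BAEKJOON_Programmers | 프로그래머스/3/12987. 숫자 게임/숫자 게임.py | solution
-- ===== SOURCE A (Python) =====
-- def solution(A, B):
--     answer = 0
--     A.sort()
--     B.sort()
--     for i in range(len(A)-1,-1,-1):
--         if B[i]>A[i]:
--             answer+=1
--             del A[i]
--             del B[i]
--         else:
--             del A[i]
--             del B[0]
--     return answer
-- ===== SOURCE B (Python) =====
-- def solution(A, B):
--     # Two-pointer greedy over both sorted lists instead of repeated list deletions.
--     # Only the len(A) smallest elements of B take part (A's countdown loop never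
--     # reaches the top len(B)-len(A) elements of sorted B).
--     As = sorted(A)
--     Bs = sorted(B)[:len(A)]
--     answer = 0
--     for b in Bs:
--         if answer < len(As) and b > As[answer]:
--             answer += 1
--     return answer
-- ===== Notes on version B (the rewrite author's own statement) =====
-- stated objective: alternative
-- what changed: Replaces the backwards loop that repeatedly deletes from both lists (del A[i]/del B[0]) by a single forward two-pointer sweep over the two sorted lists with no mutation; also A sorts and empties its argument lists in place while B leaves them untouched.
import Mathlib
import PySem

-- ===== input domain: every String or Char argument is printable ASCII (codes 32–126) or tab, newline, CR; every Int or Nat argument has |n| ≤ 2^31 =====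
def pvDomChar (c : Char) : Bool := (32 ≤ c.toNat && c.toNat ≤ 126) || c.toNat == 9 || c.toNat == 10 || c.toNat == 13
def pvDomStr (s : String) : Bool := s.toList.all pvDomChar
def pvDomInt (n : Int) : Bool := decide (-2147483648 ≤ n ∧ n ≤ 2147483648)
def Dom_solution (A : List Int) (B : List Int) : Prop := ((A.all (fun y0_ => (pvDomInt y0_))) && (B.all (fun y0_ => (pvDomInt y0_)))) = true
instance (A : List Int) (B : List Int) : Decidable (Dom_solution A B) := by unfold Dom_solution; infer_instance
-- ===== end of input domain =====

-- B replaces A's backwards deletion loop by a two-pointer sweep over the sorted lists (return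
-- value only: A sorts and empties its argument lists in place, B does not mutate them).


-- ===== PORT A =====
-- one iteration of A's loop body; state = (A, B, answer), none = an IndexError was raised
def solutionStep (st : Option (List Int × List Int × Int)) (i : Int) : Option (List Int × List Int × Int) :=
  match st with
  | none => none
  | some (a, b, ans) =>
    match PySem.List.pyGet? b i, PySem.List.pyGet? a i with
    | some bi, some ai =>
      if bi > ai then
        match PySem.List.pop? a i, PySem.List.pop? b i with
        | some (_, a'), some (_, b') => some (a', b', ans + 1)
        | _, _ => none
      else
        match PySem.List.pop? a i, PySem.List.pop? b 0 with
        | some (_, a'), some (_, b') => some (a', b', ans)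
        | _, _ => none
    | _, _ => none

def solution (A : List Int) (B : List Int) : Int :=
  let a := PySem.List.sorted A id false
  let b := PySem.List.sorted B id false
  match (PySem.List.pyRange ((A.length : Int) - 1) (-1) (-1)).foldl solutionStep (some (a, b, 0)) with
  | some (_, _, ans) => ans
  | none => 0   -- unreachable under Pre_solution: Python raises IndexError there

-- ===== PORT B =====
-- 'if answer < len(As) and b > As[answer]: answer += 1'
def solutionAltStep (as' : List Int) (ans : Int) (b : Int) : Int :=
  if ans < (as'.length : Int) then
    match PySem.List.pyGet? as' ans with
    | some a => if b > a then ans + 1 else ans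
    | none => ans   -- unreachable: 0 ≤ ans < len(As)
  else ans

def solution_alt (A : List Int) (B : List Int) : Int :=
  let as' := PySem.List.sorted A id false
  let bs := PySem.List.slice (PySem.List.sorted B id false) none (some (A.length : Int))
  bs.foldl (solutionAltStep as') 0

-- ===== PRECONDITION & SPEC =====
-- Pre_ excludes exactly the inputs on which A raises IndexError (len(B) < len(A)).
def Pre_solution (A : List Int) (B : List Int) : Prop := A.length ≤ B.length
instance (A : List Int) (B : List Int) : Decidable (Pre_solution A B) := by unfold Pre_solution; infer_instance
def pvWitness_solution : List Int × List Int := ([5, 1, 3], [4, 4, 2])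

def Spec_solution (A : List Int) (B : List Int) (out : Int) : Prop := out = solution_alt A B
instance (A : List Int) (B : List Int) (out : Int) : Decidable (Spec_solution A B out) := by unfold Spec_solution; infer_instance

-- ===== CLAIM (what is proved, stated in full; the proofs are below) =====
def Claim_equal_solution : Prop := ∀ (A : List Int) (B : List Int), Dom_solution A B → Pre_solution A B → Spec_solution A B (solution A B)

-- ===== LEMMAS AND PROOFS =====

-- Nat-state model of B's loop
def fN (as' : List Int) (s : Nat) (bs : List Int) : Nat :=
  bs.foldl (fun s b => if s < as'.length then (if b > as'.getD s 0 then s + 1 else s) else s) s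

-- recursive model of A's loop (on equal-length lists): from the top index down
def gA (a b : List Int) : Nat :=
  if ha : a = [] then 0
  else if hb : b = [] then 0
  else if b.getLast hb > a.getLast ha then gA a.dropLast b.dropLast + 1
  else gA a.dropLast b.tail
termination_by a.length
decreasing_by
  all_goals
    have : a.length ≠ 0 := fun h => ha (List.eq_nil_of_length_eq_zero h)
    simp [List.length_dropLast]; omega

lemma fN_nil (as' : List Int) (s : Nat) : fN as' s [] = s := rfl

lemma fN_cons (as' : List Int) (s : Nat) (b : Int) (bs : List Int) :
    fN as' s (b :: bs) = fN as' (if s < as'.length then (if b > as'.getD s 0 then s + 1 else s) else s) bs := rfl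

lemma fN_append (as' : List Int) (s : Nat) (l1 l2 : List Int) :
    fN as' s (l1 ++ l2) = fN as' (fN as' s l1) l2 := List.foldl_append

lemma fN_bound (as' : List Int) (bs : List Int) : ∀ s, fN as' s bs ≤ s + bs.length := by
  induction bs with
  | nil => intro s; simp [fN_nil]
  | cons b bs ih =>
    intro s
    rw [fN_cons]
    simp only [List.length_cons]
    split_ifs with h1 h2
    · have := ih (s + 1); omega
    · have := ih s; omega
    · have := ih s; omega

-- the pointer never reaches the last cell: dropping it does not change the run
lemma fN_dropLast_of_short (as' : List Int) (bs : List Int) :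
    ∀ s, s + bs.length < as'.length → fN as' s bs = fN as'.dropLast s bs := by
  induction bs with
  | nil => intro s _; simp [fN_nil]
  | cons b bs ih =>
    intro s hs
    have hlt : s < as'.length - 1 := by simp at hs; omega
    have hget : as'.dropLast.getD s 0 = as'.getD s 0 := by
      rw [List.getD_eq_getElem?_getD, List.getD_eq_getElem?_getD]
      rw [List.getElem?_dropLast]
      simp [hlt]
    rw [fN_cons, fN_cons, hget]
    have h1 : s < as'.length := by omega
    have h2 : s < as'.dropLast.length := by simp [List.length_dropLast]; omega
    simp only [h1, h2, if_true]
    split_ifs with hb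
    · exact ih (s + 1) (by simp at hs ⊢; omega)
    · exact ih s (by simp at hs ⊢; omega)

-- if no b can beat the last element of as', dropping that element changes nothing
lemma fN_dropLast_of_le_last (as' : List Int) (hne : 0 < as'.length) :
    ∀ (bs : List Int) (s : Nat), (∀ x ∈ bs, x ≤ as'.getD (as'.length - 1) 0) →
    fN as' s bs = fN as'.dropLast s bs := by
  intro bs
  induction bs with
  | nil => intro s _; simp [fN_nil]
  | cons b bs ih =>
    intro s hle
    have hb := hle b List.mem_cons_self
    have hle' : ∀ x ∈ bs, x ≤ as'.getD (as'.length - 1) 0 := fun x hx => hle x (List.mem_cons_of_mem _ hx)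
    rw [fN_cons, fN_cons]
    by_cases h1 : s < as'.length - 1
    · have hget : as'.dropLast.getD s 0 = as'.getD s 0 := by
        rw [List.getD_eq_getElem?_getD, List.getD_eq_getElem?_getD, List.getElem?_dropLast, if_pos h1]
      have h2 : s < as'.length := by omega
      have h3 : s < as'.dropLast.length := by simp [List.length_dropLast]; omega
      simp only [h2, h3, if_true, hget]
      split_ifs <;> exact ih _ hle'
    · by_cases h2 : s = as'.length - 1
      · have h3 : s < as'.length := by omega
        have h4 : ¬ s < as'.dropLast.length := by simp [List.length_dropLast]; omega
        have hnb : ¬ b > as'.getD s 0 := by rw [h2]; omega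
        simp only [h3, h4, if_true, if_false]
        rw [if_neg hnb]
        exact ih _ hle'
      · have h3 : ¬ s < as'.length := by omega
        have h4 : ¬ s < as'.dropLast.length := by simp [List.length_dropLast]; omega
        simp only [h3, h4, if_false]
        exact ih _ hle'

lemma sorted_getD_mono {l : List Int} (hp : l.Pairwise (· ≤ ·)) {i j : Nat}
    (hij : i ≤ j) (hj : j < l.length) : l.getD i 0 ≤ l.getD j 0 := by
  rcases Nat.eq_or_lt_of_le hij with rfl | hlt
  · exact le_refl _
  · have := List.pairwise_iff_getElem.mp hp i j (by omega) hj hlt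
    rw [List.getD_eq_getElem l 0 (by omega), List.getD_eq_getElem l 0 hj]
    exact this

lemma sorted_mem_le_last {l : List Int} (hp : l.Pairwise (· ≤ ·)) {x : Int}
    (hx : x ∈ l) : x ≤ l.getD (l.length - 1) 0 := by
  obtain ⟨i, hi, rfl⟩ := List.mem_iff_getElem.mp hx
  rw [← List.getD_eq_getElem l 0 hi]
  exact sorted_getD_mono hp (by omega) (by omega)

-- the catch-up lemma: pointer offset by one on a list one longer, all pending b's beat as'[s]
-- but none beats the last element — the two runs end at the same pointer
lemma fN_offset (as' : List Int) :
    ∀ (bs : List Int) (s : Nat), bs ≠ [] → bs.Pairwise (· ≤ ·) →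
    s + bs.length + 1 = as'.length →
    (∀ x ∈ bs, as'.getD s 0 < x ∧ x ≤ as'.getD (as'.length - 1) 0) →
    fN as' (s + 1) bs = fN as'.dropLast s bs := by
  intro bs
  induction bs with
  | nil => intro s h; exact absurd rfl h
  | cons b rest ih =>
    intro s _ hpb hlen hbs
    have hb := hbs b List.mem_cons_self
    have hrest : ∀ x ∈ rest, as'.getD s 0 < x ∧ x ≤ as'.getD (as'.length - 1) 0 :=
      fun x hx => hbs x (List.mem_cons_of_mem _ hx)
    simp only [List.length_cons] at hlen
    have hget : as'.dropLast.getD s 0 = as'.getD s 0 := by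
      rw [List.getD_eq_getElem?_getD, List.getD_eq_getElem?_getD, List.getElem?_dropLast,
        if_pos (show s < as'.length - 1 by omega)]
    -- RHS first step always increments: b > as'[s]
    have hs2 : s < as'.dropLast.length := by simp [List.length_dropLast]; omega
    rw [fN_cons as'.dropLast, hget]
    simp only [hs2, if_true, hb.1, if_true]
    have hs1 : s + 1 < as'.length := by omega
    rw [fN_cons]
    simp only [hs1, if_true]
    by_cases hrne : rest = []
    · -- single element: s + 2 = length; LHS does not increment (b ≤ last), both end at s + 1
      subst hrne
      have hnb : ¬ b > as'.getD (s + 1) 0 := by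
        have h2 := hb.2
        have : as'.getD (s + 1) 0 = as'.getD (as'.length - 1) 0 := by
          congr 1; simp at hlen; omega
        omega
      rw [if_neg hnb, fN_nil, fN_nil]
    · -- at least two elements: s + 1 < length - 1
      have hrl : 0 < rest.length := List.length_pos_iff.mpr hrne
      by_cases hbig : b > as'.getD (s + 1) 0
      · -- double move: offset persists, apply IH at s + 1
        rw [if_pos hbig]
        apply ih (s + 1) hrne (hpb.sublist (List.sublist_cons_self _ _)) (by omega)
        intro x hx
        have hbx : b ≤ x := (List.pairwise_cons.mp hpb).1 x hx
        exact ⟨by omega, (hrest x hx).2⟩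
      · -- catch-up: both pointers now equal; finish with fN_dropLast_of_le_last
        rw [if_neg hbig]
        exact fN_dropLast_of_le_last as' (by omega) rest (s + 1) (fun x hx => (hrest x hx).2)

-- main combinatorial lemma: A's delete-from-the-top greedy equals B's two-pointer sweep
lemma gA_eq_fN : ∀ (n : Nat) (as' bs : List Int), as'.length = n → bs.length = n →
    as'.Pairwise (· ≤ ·) → bs.Pairwise (· ≤ ·) → gA as' bs = fN as' 0 bs := by
  intro n
  induction n with
  | zero =>
    intro as' bs ha hb _ _
    rw [List.length_eq_zero_iff.mp ha, List.length_eq_zero_iff.mp hb, gA]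
    simp [fN_nil]
  | succ n ih =>
    intro as' bs ha hb hpa hpb
    have hane : as' ≠ [] := by intro h; rw [h] at ha; simp at ha
    have hbne : bs ≠ [] := by intro h; rw [h] at hb; simp at hb
    have hlastA : as'.getLast hane = as'.getD (as'.length - 1) 0 := by
      rw [List.getLast_eq_getElem, List.getD_eq_getElem as' 0 (by omega)]
    have hlastB : bs.getLast hbne = bs.getD (bs.length - 1) 0 := by
      rw [List.getLast_eq_getElem, List.getD_eq_getElem bs 0 (by omega)]
    have hpa' : as'.dropLast.Pairwise (· ≤ ·) := hpa.sublist (List.dropLast_sublist _)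
    have hpb' : bs.dropLast.Pairwise (· ≤ ·) := hpb.sublist (List.dropLast_sublist _)
    rw [gA]
    simp only [hane, hbne, dif_neg, not_false_iff]
    by_cases hc : bs.getLast hbne > as'.getLast hane
    · -- B's maximum wins: it is matched by both runs
      simp only [hc, if_true]
      have hdecomp : bs.dropLast ++ [bs.getLast hbne] = bs := List.dropLast_append_getLast hbne
      conv_rhs => rw [← hdecomp, fN_append]
      have hL : fN as' 0 bs.dropLast = fN as'.dropLast 0 bs.dropLast := by
        apply fN_dropLast_of_short
        simp [List.length_dropLast, hb, ha]
      have hIH : fN as'.dropLast 0 bs.dropLast = gA as'.dropLast bs.dropLast := by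
        symm; exact ih _ _ (by simp [ha]) (by simp [hb]) hpa' hpb'
      have hs0 : fN as' 0 bs.dropLast ≤ n := by
        have := fN_bound as' bs.dropLast 0; simp [List.length_dropLast, hb] at this; omega
      have hlt : as'.getD (fN as' 0 bs.dropLast) 0 < bs.getLast hbne := by
        calc as'.getD (fN as' 0 bs.dropLast) 0 ≤ as'.getD (as'.length - 1) 0 :=
              sorted_getD_mono hpa (by omega) (by omega)
          _ = as'.getLast hane := hlastA.symm
          _ < bs.getLast hbne := hc
      rw [fN_cons, fN_nil]
      simp only [show fN as' 0 bs.dropLast < as'.length by omega, if_true, hlt, if_true]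
      rw [hL, hIH]
    · -- B's maximum loses: A discards its own maximum and B's minimum
      simp only [hc, if_false]
      obtain ⟨b0, rest, rfl⟩ := List.exists_cons_of_ne_nil hbne
      have hall : ∀ x ∈ b0 :: rest, x ≤ as'.getD (as'.length - 1) 0 := by
        intro x hx
        calc x ≤ (b0 :: rest).getD ((b0 :: rest).length - 1) 0 := sorted_mem_le_last hpb hx
          _ = (b0 :: rest).getLast hbne := hlastB.symm
          _ ≤ as'.getLast hane := by omega
          _ = as'.getD (as'.length - 1) 0 := hlastA
      have hrlen : rest.length = n := by simpa using hb
      have hIH : fN as'.dropLast 0 rest = gA as'.dropLast rest := by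
        symm; exact ih _ _ (by simp [ha]) hrlen hpa' (hpb.sublist (List.sublist_cons_self _ _))
      rw [fN_cons]
      simp only [show (0:Nat) < as'.length by omega, if_true]
      by_cases h0 : b0 > as'.getD 0 0
      · -- B's minimum beats as'[0]: pointer jumps to 1; catch-up lemma
        simp only [h0, if_true]
        have hrne : rest ≠ [] := by
          intro h; subst h
          simp at hrlen
          have : as'.length - 1 = 0 := by omega
          rw [this] at hall
          have := hall b0 List.mem_cons_self
          omega
        rw [fN_offset as' rest 0 hrne (hpb.sublist (List.sublist_cons_self _ _)) (by omega)
          (fun x hx => ⟨lt_of_lt_of_le h0 ((List.pairwise_cons.mp hpb).1 x hx), hall x (List.mem_cons_of_mem _ hx)⟩)]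
        rw [hIH]
        rfl
      · -- B's minimum beats nothing: it is skipped by both runs
        simp only [h0, if_false]
        rw [fN_dropLast_of_le_last as' (by omega) rest 0 (fun x hx => hall x (List.mem_cons_of_mem _ hx))]
        rw [hIH]
        rfl

-- bridge for B's port: the Int-state fold is the Nat-state fold
lemma altFold_eq_fN (as' : List Int) : ∀ (bs : List Int) (s : Nat),
    bs.foldl (solutionAltStep as') (s : Int) = (fN as' s bs : Int) := by
  intro bs
  induction bs with
  | nil => intro s; simp [fN_nil]
  | cons b bs ih =>
    intro s
    rw [List.foldl_cons, fN_cons]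
    have hstep : solutionAltStep as' (s : Int) b =
        ((if s < as'.length then (if b > as'.getD s 0 then s + 1 else s) else s : Nat) : Int) := by
      unfold solutionAltStep
      by_cases h : s < as'.length
      · have hci : ((s : Int) < (as'.length : Int)) := by exact_mod_cast h
        have hsome : PySem.List.pyGet? as' (s : Int) = some (as'.getD s 0) := by
          rw [PySem.List.pyGet?_natCast, List.getElem?_eq_getElem h, List.getD_eq_getElem as' 0 h]
        simp only [hsome, hci, h, if_true]
        split_ifs with hgt <;> push_cast <;> ring
      · have hci : ¬ ((s : Int) < (as'.length : Int)) := by exact_mod_cast h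
        rw [if_neg hci, if_neg h]
    rw [hstep, ih]

-- bridge for A's port: the countdown fold computes gA on the first (len a) elements of b's
-- list; the trailing t (B's largest elements when len(B) > len(A)) is never touched
lemma foldA_eq_gA : ∀ (n : Nat) (a c t : List Int) (ans : Int), a.length = n → c.length = n →
    (PySem.List.pyRange ((n : Int) - 1) (-1) (-1)).foldl solutionStep (some (a, c ++ t, ans)) =
      some (([] : List Int), t, ans + (gA a c : Int)) := by
  intro n
  induction n with
  | zero =>
    intro a c t ans ha hc
    rw [List.length_eq_zero_iff.mp ha, List.length_eq_zero_iff.mp hc]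
    rw [PySem.List.pyRange_neg_one_eq_nil (by norm_num)]
    simp [gA]
  | succ n ih =>
    intro a c t ans ha hc
    have hane : a ≠ [] := by intro h; rw [h] at ha; simp at ha
    have hcne : c ≠ [] := by intro h; rw [h] at hc; simp at hc
    have hrw : ((n + 1 : Nat) : Int) - 1 = (n : Int) := by push_cast; ring
    rw [hrw, PySem.List.pyRange_neg_one_cons (by omega), List.foldl_cons]
    have hget_a : PySem.List.pyGet? a (n : Int) = some (a.getLast hane) := by
      rw [PySem.List.pyGet?_natCast, List.getElem?_eq_getElem (by omega)]
      congr 1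
      rw [List.getLast_eq_getElem]
      congr 1
      omega
    have hcn : n < c.length := by omega
    have hgetc : (c ++ t)[n]'(by rw [List.length_append]; omega) = c.getLast hcne := by
      rw [List.getElem_append_left hcn, List.getLast_eq_getElem]
      congr 1
      omega
    have hget_b : PySem.List.pyGet? (c ++ t) (n : Int) = some (c.getLast hcne) := by
      rw [PySem.List.pyGet?_natCast, List.getElem?_eq_getElem (by rw [List.length_append]; omega)]
      rw [hgetc]
    have hpop_a : PySem.List.pop? a (n : Int) = some (a.getLast hane, a.dropLast) := by
      rw [PySem.List.pop?_natCast a n (by omega)]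
      congr 1
      rw [List.getLast_eq_getElem, List.dropLast_eq_eraseIdx]
      · congr 2 <;> omega
      · omega
    have hpop_b : PySem.List.pop? (c ++ t) (n : Int) = some (c.getLast hcne, c.dropLast ++ t) := by
      rw [PySem.List.pop?_natCast (c ++ t) n (by rw [List.length_append]; omega)]
      rw [hgetc, List.eraseIdx_append_of_lt_length hcn, List.dropLast_eq_eraseIdx]
      omega
    have hstep : solutionStep (some (a, c ++ t, ans)) (n : Int) =
        (if c.getLast hcne > a.getLast hane then some (a.dropLast, c.dropLast ++ t, ans + 1)
         else some (a.dropLast, c.tail ++ t, ans)) := by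
      by_cases hcc : c.getLast hcne > a.getLast hane
      · simp only [solutionStep, hget_a, hget_b, hcc, if_true, hpop_a, hpop_b]
      · obtain ⟨b0, bt, rfl⟩ := List.exists_cons_of_ne_nil hcne
        have hpop0 : PySem.List.pop? ((b0 :: bt) ++ t) 0 = some (b0, bt ++ t) := by
          rw [List.cons_append, PySem.List.pop?_zero_cons]
        simp only [solutionStep, hget_a, hget_b, hcc, if_false, hpop_a, hpop0]
        rfl
    rw [hstep]
    have hgA : (gA a c : Int) =
        (if c.getLast hcne > a.getLast hane then (gA a.dropLast c.dropLast : Int) + 1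
         else (gA a.dropLast c.tail : Int)) := by
      rw [gA]
      simp only [hane, hcne, dif_neg, not_false_iff]
      split_ifs <;> push_cast <;> omega
    by_cases hcc : c.getLast hcne > a.getLast hane
    · rw [if_pos hcc]
      rw [ih a.dropLast c.dropLast t (ans + 1) (by simp [ha]) (by simp [hc])]
      rw [hgA, if_pos hcc]
      have h5 : ans + 1 + (gA a.dropLast c.dropLast : Int) = ans + ((gA a.dropLast c.dropLast : Int) + 1) := by ring
      rw [h5]
    · rw [if_neg hcc]
      rw [ih a.dropLast c.tail t ans (by simp [ha]) (by simp [hc])]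
      rw [hgA, if_neg hcc]

lemma pairwise_sorted_id (l : List Int) : (PySem.List.sorted l id false).Pairwise (· ≤ ·) := by
  have := PySem.List.sorted_pairwise (xs := l) (key := id)
  simpa using this

-- ===== VERDICT (by name: the statement is the Claim_ definition above) =====
theorem solution_spec : Claim_equal_solution := by
  intro A B _ hpre
  unfold Pre_solution at hpre
  have hlen_a : (PySem.List.sorted A id false).length = A.length := PySem.List.length_sorted A id false
  have hlen_c : ((PySem.List.sorted B id false).take A.length).length = A.length := by
    rw [List.length_take, PySem.List.length_sorted]
    omega
  have hsplit : PySem.List.sorted B id false =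
      (PySem.List.sorted B id false).take A.length ++ (PySem.List.sorted B id false).drop A.length :=
    (List.take_append_drop _ _).symm
  have hga := foldA_eq_gA A.length (PySem.List.sorted A id false)
    ((PySem.List.sorted B id false).take A.length) ((PySem.List.sorted B id false).drop A.length) 0
    hlen_a hlen_c
  unfold Spec_solution
  simp only [solution, solution_alt]
  rw [hsplit, hga]
  rw [PySem.List.slice_to_natCast]
  simp only [zero_add]
  rw [show ((0 : Int)) = ((0 : Nat) : Int) from rfl, altFold_eq_fN]
  rw [gA_eq_fN A.length _ _ hlen_a hlen_c (pairwise_sorted_id A)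
    ((pairwise_sorted_id B).sublist (List.take_sublist _ _))]
  rw [← hsplit]
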